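-- pv_equiv track=rewrite | github.com/xiaojinlii/xiao-qa-generator | xiao_qa_generator/generator/qa.py | _parse_qa
-- ===== SOURCE A (Python) =====
-- from typing import Dict, Tuple, List
--
-- def _parse_qa(response_text: str) -> Tuple[List[str], List[str]]:
--     q_prefix, a_prefix = "[Q]: ", "[A]: "
--     last_updated = None
--     questions, answers = [], []
--     for line in response_text.split("\n"):
--         if line.startswith(q_prefix):
--             questions.append(line[len(q_prefix):])
--             last_updated = "Q"
--         elif line.startswith(a_prefix):
--             answers.append(line[len(a_prefix):])
--             last_updated = "A"
--         else:  # Q or A spread across multiple lines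
--             assert last_updated is not None, "Parsing error: First line must be a question"
--             if last_updated == "Q":
--                 questions[-1] += "\n" + line
--             else:
--                 answers[-1] += "\n" + line
--     return questions, answers
-- ===== SOURCE B (Python) =====
-- def _parse_qa(response_text):
--     # Pass 1: build an ordered list of (is_question, lines) blocks.
--     blocks = []
--     for line in response_text.split("\n"):
--         if line.startswith("[Q]: "):
--             blocks.append((True, [line[5:]]))
--         elif line.startswith("[A]: "):
--             blocks.append((False, [line[5:]]))
--         else:
--             assert blocks, "Parsing error: First line must be a question"
--             blocks[-1][1].append(line)
--     # Pass 2: join each block's lines and split blocks by kind.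
--     questions = ["\n".join(ls) for is_q, ls in blocks if is_q]
--     answers = ["\n".join(ls) for is_q, ls in blocks if not is_q]
--     return questions, answers
-- ===== Notes on version B (the rewrite author's own statement) =====
-- stated objective: alternative
-- what changed: B first groups the lines into an ordered list of (kind, lines) blocks and only then joins each block with a newline and splits the blocks into questions/answers, instead of A's single loop that tracks a last_updated flag and repeatedly concatenates onto the last element of the result lists.
import Mathlib
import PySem

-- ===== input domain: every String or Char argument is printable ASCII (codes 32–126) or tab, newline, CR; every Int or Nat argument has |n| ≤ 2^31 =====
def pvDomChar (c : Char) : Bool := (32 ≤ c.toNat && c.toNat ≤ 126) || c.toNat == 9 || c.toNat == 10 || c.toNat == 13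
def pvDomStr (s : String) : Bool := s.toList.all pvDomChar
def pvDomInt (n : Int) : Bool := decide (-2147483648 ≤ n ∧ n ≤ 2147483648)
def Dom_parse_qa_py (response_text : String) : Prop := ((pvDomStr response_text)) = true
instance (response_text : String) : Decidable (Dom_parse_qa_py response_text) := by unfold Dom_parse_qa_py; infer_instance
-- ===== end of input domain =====

-- B replaces A's single loop (last_updated flag + concatenation onto the last list element) by a
-- two-pass shape: group lines into (kind, lines) blocks, then join each block and split by kind.

-- ===== PORT A =====
-- questions[-1] += "\n" + line  (appends to the last element; [] stays [] — Python raises before reaching that case)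
def pvAddLast : List String → String → List String
  | [], _ => []
  | [q], l => [q ++ "\n" ++ l]
  | q :: qs, l => q :: pvAddLast qs l

def pvStepA (st : Option String × List String × List String) (line : String) :
    Option String × List String × List String :=
  if PySem.Str.startswith line "[Q]: " then
    (some "Q", st.2.1 ++ [PySem.Str.slice line (some 5) none], st.2.2)
  else if PySem.Str.startswith line "[A]: " then
    (some "A", st.2.1, st.2.2 ++ [PySem.Str.slice line (some 5) none])
  else
    match st.1 with
    | none => st   -- Python raises AssertionError here; excluded by Pre_
    | some u => if u = "Q" then (st.1, pvAddLast st.2.1 line, st.2.2)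
                else (st.1, st.2.1, pvAddLast st.2.2 line)

def parse_qa_py (response_text : String) : List String × List String :=
  let st := ((PySem.Str.split? response_text "\n").getD []).foldl pvStepA (none, [], [])
  (st.2.1, st.2.2)

-- ===== PORT B =====
-- blocks[-1][1].append(line)  (appends to the last block's lines; [] stays [] — Python raises before reaching that case)
def pvAddLine : List (Bool × List String) → String → List (Bool × List String)
  | [], _ => []
  | [(k, ls)], l => [(k, ls ++ [l])]
  | b :: bs, l => b :: pvAddLine bs l

def pvStepB (bs : List (Bool × List String)) (line : String) : List (Bool × List String) :=
  if PySem.Str.startswith line "[Q]: " then bs ++ [(true, [PySem.Str.slice line (some 5) none])]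
  else if PySem.Str.startswith line "[A]: " then bs ++ [(false, [PySem.Str.slice line (some 5) none])]
  else pvAddLine bs line   -- Python asserts blocks ≠ [] first; on [] this is a no-op, excluded by Pre_

def parse_qa_py_alt (response_text : String) : List String × List String :=
  let blocks := ((PySem.Str.split? response_text "\n").getD []).foldl pvStepB []
  ((blocks.filter (fun b => b.1)).map (fun b => PySem.Str.join "\n" b.2),
   (blocks.filter (fun b => !b.1)).map (fun b => PySem.Str.join "\n" b.2))

-- ===== PRECONDITION & SPEC =====
-- Pre_ excludes exactly the inputs whose first line carries neither prefix: there both the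
-- Python A and the Python B raise AssertionError instead of returning.
def Pre_parse_qa_py (response_text : String) : Prop :=
  PySem.Str.startswith (((PySem.Str.split? response_text "\n").getD []).headD "") "[Q]: " = true ∨
  PySem.Str.startswith (((PySem.Str.split? response_text "\n").getD []).headD "") "[A]: " = true
instance (response_text : String) : Decidable (Pre_parse_qa_py response_text) := by
  unfold Pre_parse_qa_py; infer_instance

def pvWitness_parse_qa_py : String := "[Q]: hi\nthere\n[A]: yes"

def Spec_parse_qa_py (response_text : String) (out : List String × List String) : Prop :=
  out = parse_qa_py_alt response_text
instance (response_text : String) (out : List String × List String) :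
    Decidable (Spec_parse_qa_py response_text out) := by unfold Spec_parse_qa_py; infer_instance

-- ===== CLAIM (what is proved, stated in full; the proofs are below) =====
def Claim_equal_parse_qa_py : Prop := ∀ (response_text : String), Dom_parse_qa_py response_text →
  Pre_parse_qa_py response_text → Spec_parse_qa_py response_text (parse_qa_py response_text)

-- ===== LEMMAS AND PROOFS =====

-- A's running state as a function of B's block list
def pvLastK (bs : List (Bool × List String)) : Option String :=
  match bs.getLast? with
  | none => none
  | some b => if b.1 then some "Q" else some "A"

def pvRQ (bs : List (Bool × List String)) : List String :=
  (bs.filter (fun b => b.1)).map (fun b => PySem.Str.join "\n" b.2)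

def pvRA (bs : List (Bool × List String)) : List String :=
  (bs.filter (fun b => !b.1)).map (fun b => PySem.Str.join "\n" b.2)

lemma pvAddLast_concat (xs : List String) (x l : String) :
    pvAddLast (xs ++ [x]) l = xs ++ [x ++ "\n" ++ l] := by
  induction xs with
  | nil => rfl
  | cons a as ih =>
    cases as with
    | nil => simp [pvAddLast]
    | cons b bs => simpa [pvAddLast] using ih

lemma pvAddLine_concat (cs : List (Bool × List String)) (k : Bool) (ls : List String) (l : String) :
    pvAddLine (cs ++ [(k, ls)]) l = cs ++ [(k, ls ++ [l])] := by
  induction cs with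
  | nil => rfl
  | cons a as ih =>
    cases as with
    | nil => simp [pvAddLine]
    | cons b bs => simpa [pvAddLine] using ih

lemma chars_join_concat (sep : List Char) (ps : List (List Char)) (p : List Char) (h : ps ≠ []) :
    PySem.Chars.join sep (ps ++ [p]) = PySem.Chars.join sep ps ++ sep ++ p := by
  induction ps with
  | nil => exact absurd rfl h
  | cons a as ih =>
    cases as with
    | nil => simp [PySem.Chars.join_cons_cons, PySem.Chars.join_singleton]
    | cons b bs =>
      have := ih (by simp)
      simp only [List.cons_append, PySem.Chars.join_cons_cons] at this ⊢
      simp [this]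

lemma str_join_singleton (x : String) : PySem.Str.join "\n" [x] = x := by
  apply String.toList_inj.mp
  simp [PySem.Str.toList_join, PySem.Chars.join_singleton]

lemma str_join_concat (ls : List String) (l : String) (h : ls ≠ []) :
    PySem.Str.join "\n" (ls ++ [l]) = PySem.Str.join "\n" ls ++ "\n" ++ l := by
  apply String.toList_inj.mp
  simp only [PySem.Str.toList_join, List.map_append, List.map_cons, List.map_nil,
    String.toList_append]
  rw [chars_join_concat _ _ _ (by simpa using h)]

lemma pvStep_eq (bs : List (Bool × List String)) (h : ∀ b ∈ bs, b.2 ≠ []) (line : String) :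
    pvStepA (pvLastK bs, pvRQ bs, pvRA bs) line
      = (pvLastK (pvStepB bs line), pvRQ (pvStepB bs line), pvRA (pvStepB bs line))
    ∧ ∀ b ∈ pvStepB bs line, b.2 ≠ [] := by
  unfold pvStepA pvStepB
  by_cases hq : PySem.Str.startswith line "[Q]: " = true
  · rw [if_pos hq, if_pos hq]
    constructor
    · simp [pvLastK, pvRQ, pvRA, str_join_singleton]
    · intro b hb
      rcases List.mem_append.mp hb with hb | hb
      · exact h b hb
      · simp at hb; simp [hb]
  · rw [if_neg hq, if_neg hq]
    by_cases ha : PySem.Str.startswith line "[A]: " = true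
    · rw [if_pos ha, if_pos ha]
      constructor
      · simp [pvLastK, pvRQ, pvRA, str_join_singleton]
      · intro b hb
        rcases List.mem_append.mp hb with hb | hb
        · exact h b hb
        · simp at hb; simp [hb]
    · rw [if_neg ha, if_neg ha]
      rcases List.eq_nil_or_concat bs with rfl | ⟨cs, ⟨k, ls⟩, rfl⟩
      · exact ⟨by simp [pvLastK, pvRQ, pvRA, pvAddLine], by simp [pvAddLine]⟩
      · simp only [List.concat_eq_append] at h ⊢
        have hls : ls ≠ [] := h (k, ls) (by simp)
        rw [pvAddLine_concat]
        constructor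
        · cases k
          · -- answer block at the end
            have hK : pvLastK (cs ++ [(false, ls)]) = some "A" := by simp [pvLastK]
            have hK' : pvLastK (cs ++ [(false, ls ++ [line])]) = some "A" := by simp [pvLastK]
            rw [hK, hK']
            have hne : ¬ ("A" : String) = "Q" := by decide
            dsimp only
            rw [if_neg hne]
            refine Prod.ext rfl (Prod.ext ?_ ?_)
            · simp [pvRQ, List.filter_append]
            · simp [pvRA, List.filter_append, pvAddLast_concat, str_join_concat ls line hls]
          · -- question block at the end
            have hK : pvLastK (cs ++ [(true, ls)]) = some "Q" := by simp [pvLastK]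
            have hK' : pvLastK (cs ++ [(true, ls ++ [line])]) = some "Q" := by simp [pvLastK]
            rw [hK, hK']
            dsimp only
            rw [if_pos rfl]
            refine Prod.ext rfl (Prod.ext ?_ ?_)
            · simp [pvRQ, List.filter_append, pvAddLast_concat, str_join_concat ls line hls]
            · simp [pvRA, List.filter_append]
        · intro b hb
          rcases List.mem_append.mp hb with hb | hb
          · exact h b (List.mem_append.mpr (Or.inl hb))
          · simp at hb; simp [hb]

lemma pvFold_eq (lines : List String) : ∀ (bs : List (Bool × List String)),
    (∀ b ∈ bs, b.2 ≠ []) →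
    lines.foldl pvStepA (pvLastK bs, pvRQ bs, pvRA bs)
      = (pvLastK (lines.foldl pvStepB bs), pvRQ (lines.foldl pvStepB bs),
         pvRA (lines.foldl pvStepB bs)) := by
  induction lines with
  | nil => intro bs _; rfl
  | cons line rest ih =>
    intro bs h
    obtain ⟨h1, h2⟩ := pvStep_eq bs h line
    simp only [List.foldl_cons, h1]
    exact ih _ h2

-- ===== VERDICT (by name: the statement is the Claim_ definition above) =====
theorem parse_qa_py_spec : Claim_equal_parse_qa_py := by
  intro t _ _
  unfold Spec_parse_qa_py parse_qa_py parse_qa_py_alt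
  have h0 : ((none : Option String), ([] : List String), ([] : List String))
      = (pvLastK [], pvRQ [], pvRA []) := rfl
  rw [h0, pvFold_eq _ [] (by simp)]
  rfl
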